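-- pv_equiv track=rewrite | github.com/depebul/AGH | ASD/kol1/kol1.py | maxrank
-- ===== SOURCE A (Python) =====
-- def quicksort(T):
--     if len(T) <= 1:
--         return T
--     else:
--         pivot = T[0]
--         less_than_pivot = [x for x in T[1:] if x[0] <= pivot[0]]
--         greater_than_pivot = [x for x in T[1:] if x[0] > pivot[0]]
--         return quicksort(less_than_pivot) + [pivot] + quicksort(greater_than_pivot)
--
-- def maxrank(T):
--     newlist = []
--     for i in range(len(T)):
--         newlist.append((T[i], i))
--     Ti = quicksort(newlist)
--     orderlist = [0]*(len(T) + 1 )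
--     for i in range(len(T)):
--         orderlist[Ti[i][1]] = i
--     tab = [0]*len(T)
--     for i in range(len(T)):
--         tab[i] = orderlist[i] + i - len(T) + 1
--     return max(tab)
-- ===== SOURCE B (Python) =====
-- def maxrank(T):
--     n = len(T)
--     def score(i):
--         before_smaller = sum(1 for j in range(i) if T[j] < T[i])
--         after_larger = sum(1 for j in range(i + 1, n) if T[j] > T[i])
--         return before_smaller - after_larger
--     return max(score(i) for i in range(n))
-- ===== Notes on version B (the rewrite author's own statement) =====
-- stated objective: alternative
-- what changed: Eliminates sorting entirely: instead of quicksorting (value,index) pairs, inverting the permutation into a rank table and maximising rank+i-n+1, B computes each element's answer directly by pair counting as (#strictly smaller elements before i) - (#strictly larger elements after i) and takes the max; the two are equal because rank(i)+i-(n-1) telescopes to that difference under the quicksort's (value asc, index desc) order.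
-- outside the precondition, e.g. on maxrank([]): A raises ValueError, B raises ValueError
import Mathlib
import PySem

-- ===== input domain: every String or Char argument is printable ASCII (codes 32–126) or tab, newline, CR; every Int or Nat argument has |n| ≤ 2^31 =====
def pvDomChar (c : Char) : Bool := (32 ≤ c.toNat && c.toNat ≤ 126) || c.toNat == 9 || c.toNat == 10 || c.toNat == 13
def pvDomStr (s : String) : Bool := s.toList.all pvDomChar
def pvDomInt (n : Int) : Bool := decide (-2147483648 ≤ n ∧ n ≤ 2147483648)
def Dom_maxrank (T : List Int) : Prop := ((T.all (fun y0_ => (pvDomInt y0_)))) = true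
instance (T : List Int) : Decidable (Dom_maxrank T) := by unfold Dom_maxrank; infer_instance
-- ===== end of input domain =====

-- B eliminates sorting entirely: each element's answer is computed directly by pair counting
-- as (#smaller before i) - (#larger after i), and the maximum is taken (objective: alternative).


-- ===== PORT A =====
-- Python list item assignment xs[i] = v; exact for indices in range (incl. negative wrap),
-- which is the only case A's loops reach (Python raises IndexError out of range).
def pySetItem (xs : List Int) (i : Int) (v : Int) : List Int :=
  if 0 ≤ i then xs.set i.toNat v else xs.set (xs.length - (-i).toNat) v

def quicksortA : List (Int × Int) → List (Int × Int)
  | [] => []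
  | pivot :: rest =>
    if (pivot :: rest).length ≤ 1 then pivot :: rest
    else
      quicksortA (rest.filter (fun x => x.1 ≤ pivot.1)) ++ [pivot] ++
        quicksortA (rest.filter (fun x => pivot.1 < x.1))
termination_by l => l.length
decreasing_by
  · simpa using Nat.lt_succ_of_le (List.length_filter_le _ rest.attach)
  · simpa using Nat.lt_succ_of_le (List.length_filter_le _ rest.attach)

def maxrank (T : List Int) : Int :=
  let n : Int := PySem.List.len T
  let newlist : List (Int × Int) :=
    (PySem.List.pyRange 0 n 1).foldl (fun acc i => acc ++ [(PySem.List.pyGetD T i 0, i)]) []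
  let Ti := quicksortA newlist
  let orderlist0 : List Int := List.replicate (T.length + 1) 0
  let orderlist :=
    (PySem.List.pyRange 0 n 1).foldl
      (fun ol i => pySetItem ol (PySem.List.pyGetD Ti i (0, 0)).2 i) orderlist0
  let tab0 : List Int := List.replicate T.length 0
  let tab :=
    (PySem.List.pyRange 0 n 1).foldl
      (fun tb i => pySetItem tb i (PySem.List.pyGetD orderlist i 0 + i - n + 1)) tab0
  (PySem.List.max? tab (fun x => x)).getD 0   -- max(tab); Pre_ excludes tab = [] (ValueError)

-- ===== PORT B =====
def maxrank_alt (T : List Int) : Int :=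
  let n : Int := PySem.List.len T
  let score : Int → Int := fun i =>
    let beforeSmaller : Int :=
      (PySem.List.pyRange 0 i 1).foldl
        (fun acc j => if PySem.List.pyGetD T j 0 < PySem.List.pyGetD T i 0 then acc + 1 else acc) 0
    let afterLarger : Int :=
      (PySem.List.pyRange (i + 1) n 1).foldl
        (fun acc j => if PySem.List.pyGetD T i 0 < PySem.List.pyGetD T j 0 then acc + 1 else acc) 0
    beforeSmaller - afterLarger
  (PySem.List.max? ((PySem.List.pyRange 0 n 1).map score) (fun x => x)).getD 0
    -- max(score(i) for i in range(n)); Pre_ excludes the empty generator (ValueError)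

-- ===== PRECONDITION & SPEC =====
-- Python's max raises ValueError on an empty sequence, so both programs raise on T = [].
def Pre_maxrank (T : List Int) : Prop := T ≠ []
instance (T : List Int) : Decidable (Pre_maxrank T) := by unfold Pre_maxrank; infer_instance
def pvWitness_maxrank : List Int := [3, 1, 3, 2]

def Spec_maxrank (T : List Int) (out : Int) : Prop := out = maxrank_alt T
instance (T : List Int) (out : Int) : Decidable (Spec_maxrank T out) := by
  unfold Spec_maxrank; infer_instance

-- ===== CLAIM (what is proved, stated in full; the proofs are below) =====
def Claim_equal_maxrank : Prop :=
  ∀ (T : List Int), Dom_maxrank T → Pre_maxrank T → Spec_maxrank T (maxrank T)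

-- ===== LEMMAS AND PROOFS =====

-- sort key realised by A's quicksort: value ascending, index descending among equal values
def keyA (p : Int × Int) : Lex (Int × Int) := toLex (p.1, -p.2)

theorem quicksortA_cons (p : Int × Int) (rest : List (Int × Int)) (h : rest ≠ []) :
    quicksortA (p :: rest) = quicksortA (rest.filter (fun x => x.1 ≤ p.1)) ++ [p] ++
      quicksortA (rest.filter (fun x => p.1 < x.1)) := by
  rw [quicksortA]
  rw [if_neg (by simp [h])]

theorem quicksortA_perm (l : List (Int × Int)) : (quicksortA l).Perm l := by
  have key : ∀ (n : Nat) (l : List (Int × Int)), l.length ≤ n → (quicksortA l).Perm l := by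
    intro n
    induction n with
    | zero => intro l h; rw [List.length_eq_zero_iff.mp (Nat.le_zero.mp h)]; simp [quicksortA]
    | succ n ih =>
      intro l h
      match l with
      | [] => simp [quicksortA]
      | p :: rest =>
        by_cases hr : rest = []
        · subst hr; simp [quicksortA]
        · rw [quicksortA_cons p rest hr]
          have hle : (rest.filter (fun x => decide (x.1 ≤ p.1))).length ≤ n := by
            have := List.length_filter_le (fun x => decide (x.1 ≤ p.1)) rest
            simp at h; omega
          have hgt : (rest.filter (fun x => decide (p.1 < x.1))).length ≤ n := by
            have := List.length_filter_le (fun x => decide (p.1 < x.1)) rest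
            simp at h; omega
          have hfe : rest.filter (fun x => decide (p.1 < x.1)) =
              rest.filter (fun x => !decide (x.1 ≤ p.1)) := by
            apply List.filter_congr; intro x _
            by_cases hx : x.1 ≤ p.1 <;> simp [hx] <;> omega
          have h1 : (quicksortA (rest.filter (fun x => decide (x.1 ≤ p.1))) ++ [p] ++
                  quicksortA (rest.filter (fun x => decide (p.1 < x.1)))).Perm
                (rest.filter (fun x => decide (x.1 ≤ p.1)) ++ [p] ++
                  rest.filter (fun x => decide (p.1 < x.1))) :=
            ((ih _ hle).append (List.Perm.refl [p])).append (ih _ hgt)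
          refine h1.trans ?_
          rw [hfe]
          have h2 : (rest.filter (fun x => decide (x.1 ≤ p.1)) ++ [p] ++
                  rest.filter (fun x => !decide (x.1 ≤ p.1))).Perm
                ([p] ++ rest.filter (fun x => decide (x.1 ≤ p.1)) ++
                  rest.filter (fun x => !decide (x.1 ≤ p.1))) :=
            (List.perm_append_comm).append (List.Perm.refl _)
          refine h2.trans ?_
          simpa using (List.filter_append_perm (fun x => decide (x.1 ≤ p.1)) rest).cons p
  exact key l.length l le_rfl

theorem quicksortA_pairwise (l : List (Int × Int))
    (h : l.Pairwise (fun a b => a.1 = b.1 → a.2 < b.2)) :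
    (quicksortA l).Pairwise (fun a b => keyA a < keyA b) := by
  have key : ∀ (n : Nat) (l : List (Int × Int)), l.length ≤ n →
      l.Pairwise (fun a b => a.1 = b.1 → a.2 < b.2) →
      (quicksortA l).Pairwise (fun a b => keyA a < keyA b) := by
    intro n
    induction n with
    | zero =>
      intro l h _; rw [List.length_eq_zero_iff.mp (Nat.le_zero.mp h)]; simp [quicksortA]
    | succ n ih =>
      intro l hlen hpw
      match l with
      | [] => simp [quicksortA]
      | p :: rest =>
        by_cases hr : rest = []
        · subst hr; simp [quicksortA]
        · rw [quicksortA_cons p rest hr]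
          rw [List.pairwise_cons] at hpw
          obtain ⟨hp, hrest⟩ := hpw
          have hle : (rest.filter (fun x => decide (x.1 ≤ p.1))).length ≤ n := by
            have := List.length_filter_le (fun x => decide (x.1 ≤ p.1)) rest
            simp at hlen; omega
          have hgt : (rest.filter (fun x => decide (p.1 < x.1))).length ≤ n := by
            have := List.length_filter_le (fun x => decide (p.1 < x.1)) rest
            simp at hlen; omega
          have hql := ih _ hle (hrest.filter _)
          have hqg := ih _ hgt (hrest.filter _)
          have hmemL : ∀ x ∈ quicksortA (rest.filter (fun x => decide (x.1 ≤ p.1))),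
              x ∈ rest ∧ x.1 ≤ p.1 := by
            intro x hx
            have := (quicksortA_perm _).mem_iff.mp hx
            simpa using this
          have hmemG : ∀ y ∈ quicksortA (rest.filter (fun x => decide (p.1 < x.1))),
              y ∈ rest ∧ p.1 < y.1 := by
            intro y hy
            have := (quicksortA_perm _).mem_iff.mp hy
            simpa using this
          have hRxp : ∀ x ∈ quicksortA (rest.filter (fun x => decide (x.1 ≤ p.1))),
              keyA x < keyA p := by
            intro x hx
            obtain ⟨hxr, hxle⟩ := hmemL x hx
            have hq := hp x hxr
            rw [keyA, keyA, Prod.Lex.toLex_lt_toLex]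
            rcases lt_or_eq_of_le hxle with h1 | h1
            · exact Or.inl h1
            · exact Or.inr ⟨h1, by have := hq h1.symm; omega⟩
          have hRpy : ∀ y ∈ quicksortA (rest.filter (fun x => decide (p.1 < x.1))),
              keyA p < keyA y := by
            intro y hy
            rw [keyA, keyA, Prod.Lex.toLex_lt_toLex]
            exact Or.inl (hmemG y hy).2
          rw [List.pairwise_append]
          refine ⟨?_, hqg, ?_⟩
          · rw [List.pairwise_append]
            refine ⟨hql, by simp, by simpa using hRxp⟩
          · intro a ha b hb
            rcases List.mem_append.mp ha with ha' | ha'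
            · have h1 := (hmemL a ha').2
              have h2 := (hmemG b hb).2
              rw [keyA, keyA, Prod.Lex.toLex_lt_toLex]
              exact Or.inl (lt_of_le_of_lt h1 h2)
            · have : a = p := by simpa using ha'
              subst this; exact hRpy b hb
  exact key l.length l le_rfl h

theorem foldl_set_length (ks : List Nat) (f : Nat → Nat) (g : Nat → Int) :
    ∀ ol : List Int, ((ks.foldl (fun acc k => acc.set (f k) (g k)) ol)).length = ol.length := by
  induction ks with
  | nil => intro ol; rfl
  | cons k ks ih => intro ol; rw [List.foldl_cons, ih]; simp

theorem set_loop_getD (S : List Int) (hnd : S.Nodup) (hpos : ∀ x ∈ S, 0 ≤ x)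
    (ol : List Int) (hlen : ∀ x ∈ S, x.toNat < ol.length) (j : Nat) (hj : j < ol.length) :
    ((List.range S.length).foldl (fun acc k => acc.set (S.getD k 0).toNat (k : Int)) ol).getD j 0 =
      if (j : Int) ∈ S then (List.idxOf (j : Int) S : Int) else ol.getD j 0 := by
  induction S using List.reverseRecOn with
  | nil => simp
  | append_singleton S a ih =>
    have hnd' : S.Nodup := hnd.of_append_left
    have hna : a ∉ S := by
      rw [List.nodup_append] at hnd; intro hm; exact hnd.2.2 a hm a (by simp) rfl
    have hlen' : ∀ x ∈ S, x.toNat < ol.length := fun x hx => hlen x (by simp [hx])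
    have hpos' : ∀ x ∈ S, 0 ≤ x := fun x hx => hpos x (by simp [hx])
    have hstep : (List.range (S ++ [a]).length).foldl
        (fun acc k => acc.set ((S ++ [a]).getD k 0).toNat (k : Int)) ol =
        ((List.range S.length).foldl (fun acc k => acc.set (S.getD k 0).toNat (k : Int)) ol).set
          a.toNat (S.length : Int) := by
      have h1 : (S ++ [a]).length = S.length + 1 := by simp
      rw [h1, List.range_succ, List.foldl_append]
      have h2 : (List.range S.length).foldl
          (fun acc k => acc.set ((S ++ [a]).getD k 0).toNat (k : Int)) ol =
          (List.range S.length).foldl (fun acc k => acc.set (S.getD k 0).toNat (k : Int)) ol := by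
        apply PySem.List.foldl_congr_mem
        intro acc k hk
        have hk' : k < S.length := List.mem_range.mp hk
        rw [List.getD_eq_getElem?_getD, List.getD_eq_getElem?_getD,
          List.getElem?_append_left hk']
      rw [h2]
      simp [List.getD_eq_getElem?_getD, List.getElem_concat_length]
    rw [hstep]
    by_cases hja : a.toNat = j
    · have haj : a = (j : Int) := by
        have := hpos a (by simp); omega
      have hjS : (j : Int) ∉ S := by rw [← haj]; exact hna
      rw [List.getD_eq_getElem?_getD, List.getElem?_set]
      rw [if_pos hja, if_pos (by rw [foldl_set_length]; have := hlen a (by simp); omega)]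
      simp only [Option.getD_some]
      rw [if_pos (by simp [← haj]), List.idxOf_append, if_neg hjS]
      simp [← haj]
    · have hne : (j : Int) ≠ a := by intro h; apply hja; rw [← h]; simp
      rw [List.getD_eq_getElem?_getD, List.getElem?_set, if_neg hja,
        ← List.getD_eq_getElem?_getD, ih hnd' hpos' hlen']
      by_cases hjS : (j : Int) ∈ S
      · rw [if_pos hjS, if_pos (by simp [hjS]), List.idxOf_append, if_pos hjS]
      · rw [if_neg hjS, if_neg (by simp [hjS, hne])]

theorem set_all_loop_aux (f : Nat → Int) :
    ∀ (N : Nat) (t0 : List Int), N ≤ t0.length →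
    (List.range N).foldl (fun acc k => acc.set k (f k)) t0 =
      (List.range N).map f ++ t0.drop N := by
  intro N
  induction N with
  | zero => intro t0 h; simp
  | succ N ih =>
    intro t0 h
    rw [List.range_succ, List.foldl_append, ih t0 (by omega), List.foldl_cons, List.foldl_nil]
    rw [List.set_append, if_neg (by simp)]
    simp only [List.range_succ, List.map_append, List.map_cons, List.map_nil,
      List.append_assoc, List.singleton_append]
    rw [show N - (List.map f (List.range N)).length = 0 by simp,
      List.drop_eq_getElem_cons (show N < t0.length by omega), List.set_cons_zero]

theorem set_all_loop (f : Nat → Int) (N : Nat) (t0 : List Int) (h : t0.length = N) :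
    (List.range N).foldl (fun acc k => acc.set k (f k)) t0 = (List.range N).map f := by
  rw [set_all_loop_aux f N t0 (by omega)]
  simp [h]

-- position of x in a strictly key-sorted list = number of elements with smaller key
theorem idxOf_sorted_strict (key : Int → Lex (Int × Int)) :
    ∀ (L : List Int), L.Pairwise (fun a b => key a < key b) → ∀ x ∈ L,
      (L.idxOf x : Nat) = L.countP (fun y => decide (key y < key x)) := by
  intro L
  induction L with
  | nil => intro _ x hx; simp at hx
  | cons a L ih =>
    intro hpw x hx
    rw [List.pairwise_cons] at hpw
    obtain ⟨ha, hL⟩ := hpw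
    by_cases hax : a = x
    · subst hax
      rw [List.idxOf_cons_self]
      rw [List.countP_cons]
      have h0 : (decide (key a < key a)) = false := by simp
      rw [h0, List.countP_eq_zero.mpr]
      · simp
      · intro y hy
        simp only [decide_eq_true_eq]
        exact not_lt_of_gt (ha y hy)
    · have hxL : x ∈ L := by
        rcases List.mem_cons.mp hx with h | h
        · exact absurd h.symm hax
        · exact h
      rw [List.countP_cons]
      have h1 : (decide (key a < key x)) = true := by
        simp only [decide_eq_true_eq]
        exact ha x hxL
      rw [h1, ← ih hL x hxL]
      rw [List.idxOf_cons_ne _ hax]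
      simp
-- A's final max equals B's final max: the two programs compute the same value
theorem maxrank_eq (T : List Int) (hpre : T ≠ []) : maxrank T = maxrank_alt T := by
  have hN0 : 0 < T.length := List.length_pos_iff.mpr hpre
  simp only [maxrank, maxrank_alt]
  have hlen : PySem.List.len T = (T.length : Int) := by simp
  rw [hlen]
  have hrange : PySem.List.pyRange 0 (T.length : Int) 1 =
      (List.range T.length).map (fun k : Nat => (k : Int)) := by
    rw [PySem.List.pyRange_one]; simp
  rw [hrange]
  set pair : Int → Int × Int := fun i => (PySem.List.pyGetD T i 0, i) with hpairdef
  set S := PySem.List.sorted ((List.range T.length).map (fun k : Nat => (k : Int)))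
      (fun i => toLex (PySem.List.pyGetD T i 0, -i)) with hSdef
  -- A's first loop builds the enumerated pair list
  rw [PySem.List.foldl_append_singleton_eq_map (f := pair)]
  simp only [List.nil_append, List.map_map]
  -- facts about S
  have hSperm : S.Perm ((List.range T.length).map (fun k : Nat => (k : Int))) :=
    PySem.List.sorted_perm _ _ _
  have hSnodup : S.Nodup :=
    hSperm.nodup_iff.mpr (List.nodup_range.map (fun a b => by exact_mod_cast id))
  have hSlen : S.length = T.length := by rw [hSperm.length_eq]; simp
  have hSpos : ∀ x ∈ S, 0 ≤ x ∧ x < (T.length : Int) := by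
    intro x hx
    obtain ⟨k, hk, rfl⟩ := List.mem_map.mp (hSperm.mem_iff.mp hx)
    exact ⟨Int.natCast_nonneg k, by exact_mod_cast List.mem_range.mp hk⟩
  have hSmem : ∀ k : Nat, k < T.length → (k : Int) ∈ S := by
    intro k hk
    exact hSperm.mem_iff.mpr (List.mem_map.mpr ⟨k, List.mem_range.mpr hk, rfl⟩)
  -- quicksort of the pair list is the pair list reordered along S
  have hQ : ((List.range T.length).map (pair ∘ fun k : Nat => (k : Int))).Pairwise
      (fun a b => a.1 = b.1 → a.2 < b.2) := by
    rw [List.pairwise_map]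
    refine List.pairwise_lt_range.imp (fun h _ => ?_)
    simp only [hpairdef, Function.comp_apply]
    exact_mod_cast h
  have hSlt : S.Pairwise (fun a b =>
      (toLex (PySem.List.pyGetD T a 0, -a) : Lex (Int × Int)) <
        toLex (PySem.List.pyGetD T b 0, -b)) := by
    have h1 := PySem.List.sorted_pairwise ((List.range T.length).map (fun k : Nat => (k : Int)))
      (fun i => toLex (PySem.List.pyGetD T i 0, -i))
    have h2 : S.Pairwise (· ≠ ·) := hSnodup
    rw [← hSdef] at h1
    refine (h1.and h2).imp ?_
    rintro a b ⟨hle, hne⟩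
    refine lt_of_le_of_ne hle (fun he => hne ?_)
    have := (Prod.ext_iff.mp (toLex_inj.mp he)).2
    omega
  have hmapPW : (S.map pair).Pairwise (fun a b => keyA a < keyA b) := by
    rw [List.pairwise_map]
    exact hSlt.imp (fun h => h)
  have hmapPerm : (S.map pair).Perm ((List.range T.length).map (pair ∘ fun k : Nat => (k : Int))) := by
    have := hSperm.map pair
    rwa [List.map_map] at this
  have e1 := PySem.List.sorted_eq_of_perm_of_pairwise_lt
    ((List.range T.length).map (pair ∘ fun k : Nat => (k : Int)))
    (quicksortA ((List.range T.length).map (pair ∘ fun k : Nat => (k : Int)))) keyA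
    (quicksortA_perm _) (quicksortA_pairwise _ hQ)
  have e2 := PySem.List.sorted_eq_of_perm_of_pairwise_lt
    ((List.range T.length).map (pair ∘ fun k : Nat => (k : Int)))
    (S.map pair) keyA hmapPerm hmapPW
  rw [e1.symm.trans e2]
  -- the index loops
  simp only [List.foldl_map]
  -- orderlist loop becomes a set-loop along S
  have hOL : (List.range T.length).foldl
      (fun (ol : List Int) (k : Nat) =>
        pySetItem ol (PySem.List.pyGetD (S.map pair) (k : Int) (0, 0)).2 (k : Int))
      (List.replicate (T.length + 1) 0) =
      (List.range S.length).foldl (fun acc k => acc.set (S.getD k 0).toNat (k : Int))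
        (List.replicate (T.length + 1) 0) := by
    rw [hSlen]
    apply PySem.List.foldl_congr_mem
    intro acc k hk
    have hk' : k < T.length := List.mem_range.mp hk
    have hk2 : k < (S.map pair).length := by simp [hSlen]; omega
    have hk3 : k < S.length := by omega
    rw [PySem.List.pyGetD_natCast, List.getD_eq_getElem?_getD, List.getElem?_eq_getElem hk2]
    simp only [Option.getD_some, List.getElem_map]
    show pySetItem acc (pair S[k]).2 (k : Int) = _
    have hpos : 0 ≤ S[k] := (hSpos S[k] (List.getElem_mem hk3)).1
    rw [show (pair S[k]).2 = S[k] from rfl, pySetItem, if_pos hpos,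
      List.getD_eq_getElem?_getD, List.getElem?_eq_getElem hk3]
    rfl
  rw [hOL]
  set OL := (List.range S.length).foldl (fun acc k => acc.set (S.getD k 0).toNat (k : Int))
    (List.replicate (T.length + 1) 0) with hOLdef
  -- value of orderlist at each index
  have hOLval : ∀ k : Nat, k < T.length →
      PySem.List.pyGetD OL (k : Int) 0 = (List.idxOf (k : Int) S : Int) := by
    intro k hk
    rw [PySem.List.pyGetD_natCast, hOLdef]
    rw [set_loop_getD S hSnodup (fun x hx => (hSpos x hx).1) _
      (fun x hx => by
        have := (hSpos x hx).2
        have h0 := (hSpos x hx).1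
        simp only [List.length_replicate]
        omega)
      k (by simp; omega)]
    rw [if_pos (hSmem k hk)]
  -- tab loop becomes a map
  have hTab : (List.range T.length).foldl
      (fun (tb : List Int) (k : Nat) => pySetItem tb (k : Int)
        (PySem.List.pyGetD OL (k : Int) 0 + (k : Int) - (T.length : Int) + 1))
      (List.replicate T.length 0) =
      (List.range T.length).map
        (fun (k : Nat) => PySem.List.pyGetD OL (k : Int) 0 + (k : Int) - (T.length : Int) + 1) := by
    rw [← set_all_loop
      (fun (k : Nat) => PySem.List.pyGetD OL (k : Int) 0 + (k : Int) - (T.length : Int) + 1)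
      T.length (List.replicate T.length 0) (List.length_replicate)]
    apply PySem.List.foldl_congr_mem
    intro acc k hk
    rw [pySetItem, if_pos (Int.natCast_nonneg k), Int.toNat_natCast]
  rw [hTab]
  -- B's generator is a map over the same range; show the two mapped lists are EQUAL pointwise
  congr 1
  congr 1
  apply List.map_congr_left
  intro k hk
  have hkN : k < T.length := List.mem_range.mp hk
  simp only [Function.comp_apply]
  -- A's value at index k: the sorted position of k
  rw [hOLval k hkN]
  -- B's two counting loops
  have hkey : ∀ m : Nat, (decide ((toLex (PySem.List.pyGetD T (m : Int) 0, -(m : Int)) :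
      Lex (Int × Int)) < toLex (PySem.List.pyGetD T (k : Int) 0, -(k : Int)))) =
      (decide (T.getD m 0 < T.getD k 0 ∨ (T.getD m 0 = T.getD k 0 ∧ k < m))) := by
    intro m
    simp only [PySem.List.pyGetD_natCast, Prod.Lex.toLex_lt_toLex, decide_eq_decide]
    constructor
    · rintro (h | ⟨h1, h2⟩)
      · exact Or.inl h
      · exact Or.inr ⟨h1, by omega⟩
    · rintro (h | ⟨h1, h2⟩)
      · exact Or.inl h
      · exact Or.inr ⟨h1, by omega⟩
  -- sorted position = count of key-smaller indices over range n
  have hidx : (List.idxOf (k : Int) S : Int) =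
      ((List.range T.length).countP
        (fun m => decide (T.getD m 0 < T.getD k 0 ∨ (T.getD m 0 = T.getD k 0 ∧ k < m))) : Int) := by
    have h1 := idxOf_sorted_strict (fun i => toLex (PySem.List.pyGetD T i 0, -i)) S hSlt
      (k : Int) (hSmem k hkN)
    rw [h1]
    rw [hSperm.countP_eq, List.countP_map]
    congr 1
    apply List.countP_congr
    intro m _
    simp only [Function.comp_apply]
    rw [hkey m]
  rw [hidx]
  -- B's score at k
  have hb1 : (PySem.List.pyRange 0 (k : Int) 1).foldl
      (fun acc j => if PySem.List.pyGetD T j 0 < PySem.List.pyGetD T (k : Int) 0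
        then acc + 1 else acc) 0 =
      ((List.range k).countP (fun m => decide (T.getD m 0 < T.getD k 0)) : Int) := by
    rw [PySem.List.pyRange_one]
    simp only [Int.sub_zero, Int.toNat_natCast, List.foldl_map]
    have hfb : (fun (acc : Int) (m : Nat) =>
        if PySem.List.pyGetD T (0 + (m : Int)) 0 < PySem.List.pyGetD T (k : Int) 0
        then acc + 1 else acc) =
        (fun (acc : Int) (m : Nat) =>
          if (fun m : Nat =>
            decide (PySem.List.pyGetD T (0 + (m : Int)) 0 < PySem.List.pyGetD T (k : Int) 0)) m
              = true then acc + 1 else acc) := by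
      funext acc m; simp
    rw [hfb, PySem.List.foldl_count_if]
    simp only [Int.zero_add]
    congr 1
    apply List.countP_congr
    intro m _
    simp [PySem.List.pyGetD_natCast]
  have hb2 : (PySem.List.pyRange ((k : Int) + 1) (T.length : Int) 1).foldl
      (fun acc j => if PySem.List.pyGetD T (k : Int) 0 < PySem.List.pyGetD T j 0
        then acc + 1 else acc) 0 =
      ((List.range (T.length - k - 1)).countP
        (fun t => decide (T.getD k 0 < T.getD (k + 1 + t) 0)) : Int) := by
    rw [PySem.List.pyRange_one]
    have ht : ((T.length : Int) - ((k : Int) + 1)).toNat = T.length - k - 1 := by omega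
    rw [ht]
    simp only [List.foldl_map]
    have hfb : (fun (acc : Int) (t : Nat) =>
        if PySem.List.pyGetD T (k : Int) 0 < PySem.List.pyGetD T ((k : Int) + 1 + (t : Int)) 0
        then acc + 1 else acc) =
        (fun (acc : Int) (t : Nat) =>
          if (fun t : Nat =>
            decide (PySem.List.pyGetD T (k : Int) 0 <
              PySem.List.pyGetD T ((k : Int) + 1 + (t : Int)) 0)) t = true
          then acc + 1 else acc) := by
      funext acc t; simp
    rw [hfb, PySem.List.foldl_count_if]
    simp only [Int.zero_add]
    congr 1
    apply List.countP_congr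
    intro t _
    have hc : ((k : Int) + 1 + (t : Int)) = ((k + 1 + t : Nat) : Int) := by push_cast; ring
    rw [hc, PySem.List.pyGetD_natCast, PySem.List.pyGetD_natCast]
  rw [hb1, hb2]
  -- the counting identity: rank(k) + k - n + 1 = #(smaller before) - #(larger after)
  set M : Nat := T.length - k - 1 with hMdef
  have hsplit : List.range T.length =
      (List.range k ++ [k]) ++ (List.range M).map (fun t => k + 1 + t) := by
    have h1 : T.length = (k + 1) + M := by omega
    rw [h1, List.range_add, List.range_succ]
  have hcount : (List.range T.length).countP
      (fun m => decide (T.getD m 0 < T.getD k 0 ∨ (T.getD m 0 = T.getD k 0 ∧ k < m))) =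
      (List.range k).countP (fun m => decide (T.getD m 0 < T.getD k 0)) +
        (M - (List.range M).countP (fun t => decide (T.getD k 0 < T.getD (k + 1 + t) 0))) := by
    rw [hsplit, List.countP_append, List.countP_append]
    have hA : (List.range k).countP
        (fun m => decide (T.getD m 0 < T.getD k 0 ∨ (T.getD m 0 = T.getD k 0 ∧ k < m))) =
        (List.range k).countP (fun m => decide (T.getD m 0 < T.getD k 0)) := by
      apply List.countP_congr
      intro m hm
      have : m < k := List.mem_range.mp hm
      simp only [decide_eq_true_eq]
      constructor
      · rintro (h | ⟨_, h2⟩)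
        · exact h
        · omega
      · exact Or.inl
    have hB : ([k] : List Nat).countP
        (fun m => decide (T.getD m 0 < T.getD k 0 ∨ (T.getD m 0 = T.getD k 0 ∧ k < m))) = 0 := by
      rw [List.countP_eq_zero]
      intro m hm
      have : m = k := by simpa using hm
      subst this
      simp only [decide_eq_true_eq]
      omega
    have hC : ((List.range M).map (fun t => k + 1 + t)).countP
        (fun m => decide (T.getD m 0 < T.getD k 0 ∨ (T.getD m 0 = T.getD k 0 ∧ k < m))) =
        (List.range M).countP (fun t => decide (¬ T.getD k 0 < T.getD (k + 1 + t) 0)) := by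
      rw [List.countP_map]
      apply List.countP_congr
      intro t _
      simp only [Function.comp_apply, decide_eq_true_eq]
      omega
    rw [hA, hB, hC]
    have hD : (List.range M).countP (fun t => decide (¬ T.getD k 0 < T.getD (k + 1 + t) 0)) +
        (List.range M).countP (fun t => decide (T.getD k 0 < T.getD (k + 1 + t) 0)) = M := by
      have h2 := List.length_eq_length_filter_add
        (l := List.range M) (fun t => decide (T.getD k 0 < T.getD (k + 1 + t) 0))
      have he : (List.range M).countP (fun t => decide (¬ T.getD k 0 < T.getD (k + 1 + t) 0)) =
          (List.range M).countP (fun t => !decide (T.getD k 0 < T.getD (k + 1 + t) 0)) := by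
        apply List.countP_congr
        intro t _
        by_cases h : T.getD k 0 < T.getD (k + 1 + t) 0 <;> simp [h]
      rw [he]
      simp only [List.countP_eq_length_filter]
      simp only [List.length_range] at h2
      omega
    omega
  have hle1 : (List.range M).countP (fun t => decide (T.getD k 0 < T.getD (k + 1 + t) 0)) ≤ M := by
    have := List.countP_le_length
      (p := fun t => decide (T.getD k 0 < T.getD (k + 1 + t) 0)) (l := List.range M)
    simpa using this
  rw [hcount]
  push_cast [Nat.cast_sub hle1]
  have hM : (M : Int) = (T.length : Int) - (k : Int) - 1 := by omega
  omega
-- ===== VERDICT (by name: the statement is the Claim_ definition above) =====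
theorem maxrank_spec : Claim_equal_maxrank := by
  intro T _ hpre
  unfold Spec_maxrank
  exact maxrank_eq T hpre
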